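-- pv_equiv track=rewrite | github.com/dellard/aoc2022 | 10.py | part2
-- ===== SOURCE A (Python) =====
-- def part2(program, crt_width):
--
--     cycle = 1
--     sprite = 1
--
--     row_buf = []
--
--     for opcode, val in program:
--
--         if opcode == 'noop':
--             next_sprite = sprite
--             needed_cycles = 1
--         elif opcode == 'addx':
--             next_sprite = sprite + val
--             needed_cycles = 2
--
--         for _ in range(needed_cycles):
--             # just bodging something together
--             col = (cycle - 1) % crt_width
--             if col in [sprite - 1, sprite, sprite + 1]:
--                 row_buf.append('#')
--             else:
--                 row_buf.append(' ')
--
--             # flyback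
--             if col == crt_width - 1:
--                 row_buf.append('\n')
--
--             cycle += 1
--
--         sprite = next_sprite
--
--     # We might end up with an "extra" newline on the end,
--     # but all that matters for this part is that it's legible
--     #
--     return ''.join(row_buf)
-- ===== SOURCE B (Python) =====
-- def part2(program, crt_width):
--     # Pass 1: build the sprite/X position for every rendered cycle.
--     # 'noop' takes 1 cycle, 'addx' 2; any other opcode takes as many cycles
--     # as the previous instruction and leaves the sprite alone (A's behaviour).
--     x_per_cycle = []
--     sprite = 1
--     for opcode, val in program:
--         if opcode == 'noop':
--             cycles = 1
--         elif opcode == 'addx':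
--             cycles = 2
--         x_per_cycle.extend([sprite] * cycles)
--         if opcode == 'addx':
--             sprite += val
--     # Pass 2: render the CRT from the timeline.
--     out = []
--     for i, x in enumerate(x_per_cycle):
--         col = i % crt_width
--         out.append('#' if abs(col - x) <= 1 else ' ')
--         if col == crt_width - 1:
--             out.append('\n')
--     return ''.join(out)
-- ===== Notes on version B (the rewrite author's own statement) =====
-- stated objective: alternative
-- what changed: A renders the CRT inside one interleaved CPU loop (nested per-cycle loop with carried cycle/sprite/next_sprite state); B splits this into two passes: it first builds the list of sprite X positions per cycle (an unrecognised opcode repeats the previous instruction's cycle count, matching A's leftover-state behaviour), then renders each cycle index from that timeline with an abs(col-x)<=1 test.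
import Mathlib
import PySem

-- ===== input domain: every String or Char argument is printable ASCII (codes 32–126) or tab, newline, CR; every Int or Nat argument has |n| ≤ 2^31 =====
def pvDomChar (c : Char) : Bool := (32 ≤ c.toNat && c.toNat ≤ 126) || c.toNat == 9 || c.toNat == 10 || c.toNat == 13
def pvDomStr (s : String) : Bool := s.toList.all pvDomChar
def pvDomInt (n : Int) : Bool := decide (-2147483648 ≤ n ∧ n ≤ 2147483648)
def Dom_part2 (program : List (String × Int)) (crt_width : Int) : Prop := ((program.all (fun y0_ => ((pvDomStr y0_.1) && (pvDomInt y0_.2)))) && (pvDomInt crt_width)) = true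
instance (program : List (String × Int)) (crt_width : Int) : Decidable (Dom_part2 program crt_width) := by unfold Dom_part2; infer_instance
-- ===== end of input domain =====

-- B replaces A's single interleaved CPU/CRT loop by two passes (build the per-cycle sprite
-- timeline — keeping A's treatment of an unrecognised opcode, which repeats the previous
-- instruction's cycle count with the sprite unchanged — then render that timeline);
-- same cost, alternative decomposition.

-- ===== PORT A =====
-- the inner 'for _ in range(needed_cycles)' loop: returns the updated (cycle, row_buf)
def part2_inner (w sprite : Int) : Nat → Int → List String → Int × List String
  | 0, cycle, rb => (cycle, rb)
  | n + 1, cycle, rb =>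
    let col := PySem.Int.mod (cycle - 1) w
    let rb := rb ++ [if col == sprite - 1 || col == sprite || col == sprite + 1 then "#" else " "]
    let rb := if col == w - 1 then rb ++ ["\n"] else rb
    part2_inner w sprite n (cycle + 1) rb

-- the outer loop; next_sprite/needed_cycles are carried (Python leaves them bound across
-- iterations); initialised to 0/0, unread inside Pre_part2 (first opcode valid there)
def part2_outer (w : Int) : List (String × Int) → Int → Int → Int → Int → List String → List String
  | [], _, _, _, _, rb => rb
  | (opcode, val) :: rest, cycle, sprite, nextS, needed, rb =>
    let st :=
      if opcode == "noop" then (sprite, (1 : Int))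
      else if opcode == "addx" then (sprite + val, (2 : Int))
      else (nextS, needed)
    let r := part2_inner w sprite st.2.toNat cycle rb
    part2_outer w rest r.1 st.1 st.1 st.2 r.2

def part2 (program : List (String × Int)) (crt_width : Int) : String :=
  PySem.Str.join "" (part2_outer crt_width program 1 1 0 0 [])

-- ===== PORT B =====
-- pass 1: the sprite/X value at each cycle; 'cycles' is carried across iterations (Python's
-- binding is left over for an unrecognised opcode); initialised to 0, unread inside Pre_part2
def part2_timeline : List (String × Int) → Int → Int → List Int
  | [], _, _ => []
  | (opcode, val) :: rest, sprite, cycles =>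
    let c : Int := if opcode == "noop" then 1 else if opcode == "addx" then 2 else cycles
    List.replicate c.toNat sprite ++
      part2_timeline rest (if opcode == "addx" then sprite + val else sprite) c

-- pass 2: render cycle index i from the timeline
def part2_render (w : Int) : Nat → List Int → List String
  | _, [] => []
  | i, x :: rest =>
    let col := PySem.Int.mod (i : Int) w
    (if |col - x| ≤ 1 then "#" else " ") ::
      (if col == w - 1 then "\n" :: part2_render w (i + 1) rest
       else part2_render w (i + 1) rest)

def part2_alt (program : List (String × Int)) (crt_width : Int) : String :=
  PySem.Str.join "" (part2_render crt_width 0 (part2_timeline program 1 0))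

-- ===== PRECONDITION & SPEC =====
-- Pre_ is exactly where A returns normally: either the program is empty (output ''), or its
-- first opcode is 'noop'/'addx' (else UnboundLocalError) and crt_width ≠ 0 (else
-- ZeroDivisionError). B raises on exactly the same inputs.
def Pre_part2 (program : List (String × Int)) (crt_width : Int) : Prop :=
  program = [] ∨
    (crt_width ≠ 0 ∧
      (program.head?.map Prod.fst = some "noop" ∨ program.head?.map Prod.fst = some "addx"))
instance (program : List (String × Int)) (crt_width : Int) : Decidable (Pre_part2 program crt_width) := by
  unfold Pre_part2; infer_instance

def pvWitness_part2 : (List (String × Int)) × Int :=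
  ([("addx", 3), ("noop", 0), ("addx", -2)], 4)

def Spec_part2 (program : List (String × Int)) (crt_width : Int) (out : String) : Prop := out = part2_alt program crt_width
instance (program : List (String × Int)) (crt_width : Int) (out : String) : Decidable (Spec_part2 program crt_width out) := by unfold Spec_part2; infer_instance

-- ===== CLAIM (what is proved, stated in full; the proofs are below) =====
def Claim_equal_part2 : Prop := ∀ (program : List (String × Int)) (crt_width : Int), Dom_part2 program crt_width → Pre_part2 program crt_width → Spec_part2 program crt_width (part2 program crt_width)

-- ===== LEMMAS AND PROOFS =====

-- one rendered cycle: A's membership test equals B's |col - sprite| ≤ 1 test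
lemma part2_pixel_eq (col s : Int) :
    (if (col = s - 1 ∨ col = s) ∨ col = s + 1 then "#" else " ")
      = (if |col - s| ≤ 1 then "#" else " ") := by
  by_cases h : |col - s| ≤ 1
  · rw [if_pos h]
    have := abs_le.mp h
    rw [if_pos (by omega)]
  · rw [if_neg h]
    have habs : ¬(-1 ≤ col - s ∧ col - s ≤ 1) := fun hc => h (abs_le.mpr hc)
    rw [if_neg (by omega)]

-- the rendering pass splits over an append of timelines
lemma part2_render_append (w : Int) :
    ∀ (xs : List Int) (i : Nat) (ys : List Int),
      part2_render w i (xs ++ ys)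
        = part2_render w i xs ++ part2_render w (i + xs.length) ys := by
  intro xs
  induction xs with
  | nil => intro i ys; simp [part2_render]
  | cons x xs ih =>
    intro i ys
    simp only [List.cons_append, part2_render]
    by_cases h : PySem.Int.mod (i : Int) w == w - 1 <;>
      simp [h, ih (i + 1) ys, List.length_cons] <;>
      · have : i + 1 + xs.length = i + (xs.length + 1) := by omega
        rw [this]

-- A's inner loop over n cycles at sprite s, started at cycle i+1, appends exactly B's
-- rendering of n copies of s starting at index i
lemma part2_inner_eq_render (w s : Int) :
    ∀ (n i : Nat) (rb : List String),
      part2_inner w s n ((i : Int) + 1) rb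
        = (((i + n : Nat) : Int) + 1, rb ++ part2_render w i (List.replicate n s)) := by
  intro n
  induction n with
  | zero => intro i rb; simp [part2_inner, part2_render]
  | succ n ih =>
    intro i rb
    show part2_inner w s (n + 1) ((i : Int) + 1) rb = _
    simp only [part2_inner]
    have hsub : ((i : Int) + 1 - 1) = (i : Int) := by ring
    have hstep : ((i : Int) + 1 + 1) = ((i + 1 : Nat) : Int) + 1 := by push_cast; ring
    rw [hsub, hstep, ih (i + 1)]
    have hn : i + 1 + n = i + (n + 1) := by omega
    simp only [List.replicate_succ, part2_render, hn]
    by_cases h : PySem.Int.mod (i : Int) w == w - 1 <;>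
      simp [h, part2_pixel_eq, List.append_assoc]

-- main invariant: once one instruction has completed, A's next_sprite equals its sprite, and
-- the outer loop at cycle i+1 appends exactly the rendering of B's timeline
lemma part2_outer_eq_render (w : Int) :
    ∀ (prog : List (String × Int)) (i : Nat) (sprite needed : Int) (rb : List String),
      part2_outer w prog ((i : Int) + 1) sprite sprite needed rb
        = rb ++ part2_render w i (part2_timeline prog sprite needed) := by
  intro prog
  induction prog with
  | nil => intro i sprite needed rb; simp [part2_outer, part2_timeline, part2_render]
  | cons p rest ih =>
    intro i sprite needed rb
    obtain ⟨opcode, val⟩ := p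
    show part2_outer w ((opcode, val) :: rest) ((i : Int) + 1) sprite sprite needed rb = _
    simp only [part2_outer, part2_timeline]
    by_cases h1 : opcode == "noop"
    · have h2 : (opcode == "addx") = false := by
        rw [beq_iff_eq] at h1; subst h1; decide
      simp only [h1, h2, if_true, if_false, Bool.false_eq_true,
        part2_inner_eq_render w sprite ((1 : Int).toNat) i rb, ih]
      rw [part2_render_append, List.append_assoc]
      simp
    · by_cases h2 : opcode == "addx"
      · simp only [h1, h2, if_true, if_false, Bool.false_eq_true,
          part2_inner_eq_render w sprite ((2 : Int).toNat) i rb, ih]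
        rw [part2_render_append, List.append_assoc]
        simp
      · simp only [h1, h2, if_false, Bool.false_eq_true,
          part2_inner_eq_render w sprite needed.toNat i rb, ih]
        rw [part2_render_append, List.append_assoc]
        simp

-- the first instruction: A starts with next_sprite/needed_cycles unbound (ported as 0/0) and
-- B with cycles unbound (ported as 0); a valid first opcode reads neither
lemma part2_start (w val : Int) (rest : List (String × Int)) (opcode : String)
    (hop : opcode = "noop" ∨ opcode = "addx") (nS nd : Int) :
    part2_outer w ((opcode, val) :: rest) (((0 : Nat) : Int) + 1) 1 nS nd []
      = part2_render w 0 (part2_timeline ((opcode, val) :: rest) 1 0) := by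
  rcases hop with h | h <;> subst h
  · simp only [part2_outer, part2_timeline, beq_self_eq_true, if_true,
      part2_inner_eq_render w 1 ((1 : Int).toNat) 0 [],
      part2_outer_eq_render]
    rw [part2_render_append]
    simp
  · have hne : (("addx" : String) == "noop") = false := by decide
    simp only [part2_outer, part2_timeline, hne, beq_self_eq_true, if_true, if_false,
      Bool.false_eq_true, part2_inner_eq_render w 1 ((2 : Int).toNat) 0 [],
      part2_outer_eq_render]
    rw [part2_render_append]
    simp

-- ===== VERDICT (by name: the statement is the Claim_ definition above) =====
theorem part2_spec : Claim_equal_part2 := by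
  intro program crt_width _ hpre
  unfold Spec_part2 part2 part2_alt
  rcases hpre with h | ⟨-, hhead⟩
  · subst h; rfl
  cases program with
  | nil => rfl
  | cons p rest =>
    obtain ⟨opcode, val⟩ := p
    have hop : opcode = "noop" ∨ opcode = "addx" := by
      rcases hhead with h | h <;> [left; right] <;> simpa using h
    congr 1
    exact part2_start crt_width val rest opcode hop 0 0
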